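-- pv_equiv track=rewrite | github.com/kyckjh/Gitlab-Mirroring | 230209/hw1_sw4861.py | hm
-- ===== SOURCE A (Python) =====
-- def hm(N, M, arr):
--     for i in range(N):
--         for j in range(N-M+1):
--             k = 0
--             while k < M//2:
--                 if arr[i][j+k] == arr[i][j+M-k-1]:
--                     k += 1
--                     continue
--                 else:
--                     break
--             if k == M//2:
--                 return i, j, True
--             k = 0
--             while k < M//2:
--                 if arr[j+k][i] == arr[j+M-k-1][i]:
--                     k += 1
--                     continue
--                 else:
--                     break
--             if k == M//2:
--                 return i, j, False
-- ===== SOURCE B (Python) =====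
-- def hm(N, M, arr):
--     # No window of length M fits (or M is negative): nothing to find.
--     if M < 0 or M > N or N <= 0:
--         return None
--     half = M // 2
--     def pal_starts(seq):
--         # pal_starts(seq)[j] == True  iff  seq[j:j+M] is a palindrome
--         return [seq[j:j+half] == seq[j+M-half:j+M][::-1] for j in range(N-M+1)]
--     rowpal = [pal_starts(arr[i]) for i in range(N)]
--     colpal = [pal_starts([arr[r][i] for r in range(N)]) for i in range(N)]
--     for i in range(N):
--         for j in range(N-M+1):
--             if rowpal[i][j]:
--                 return i, j, True
--             if colpal[i][j]:
--                 return i, j, False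
--     return None
-- ===== Notes on version B (the rewrite author's own statement) =====
-- stated objective: alternative
-- what changed: B replaces A's interleaved per-window while-loops (index pairs checked one by one, columns read on the fly) by a two-phase algorithm: it first precomputes boolean palindrome tables for every row and for every explicitly materialised column using half-slice == reversed-half-slice comparisons, then scans the tables in A's (i,j) order.
-- outside the precondition, e.g. on hm(1, 1, []): A returns (0, 0, True), B raises IndexError; on hm(2, 2, [[1, 1]]): A returns (0, 0, True), B raises IndexError
import Mathlib
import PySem

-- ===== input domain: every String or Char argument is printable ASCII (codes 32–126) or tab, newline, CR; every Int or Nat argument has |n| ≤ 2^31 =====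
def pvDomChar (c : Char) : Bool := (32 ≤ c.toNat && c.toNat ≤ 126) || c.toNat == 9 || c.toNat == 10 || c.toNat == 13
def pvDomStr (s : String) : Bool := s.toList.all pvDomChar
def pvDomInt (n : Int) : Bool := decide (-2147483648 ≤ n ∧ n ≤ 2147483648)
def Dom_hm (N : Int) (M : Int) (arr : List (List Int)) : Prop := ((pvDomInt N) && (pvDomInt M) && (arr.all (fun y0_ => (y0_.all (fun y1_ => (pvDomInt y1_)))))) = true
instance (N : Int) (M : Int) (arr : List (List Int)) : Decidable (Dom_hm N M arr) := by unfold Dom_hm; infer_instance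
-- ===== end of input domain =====

-- B precomputes palindrome tables for all rows and all materialised columns via slice/reverse,
-- then scans the tables in A's order; same cost class, different decomposition (objective: alternative).

-- ===== PORT A =====
-- the while-loop 'k = 0; while k < M//2: if get(k) == get(M-k-1): k += 1 else: break'; returns final k
def hmK (get : Int → Int) (M : Int) (k : Int) (fuel : Nat) : Int :=
  match fuel with
  | 0 => k
  | fuel' + 1 =>
    if k < PySem.Int.floordiv M 2 then
      if get k == get (M - k - 1) then hmK get M (k + 1) fuel' else k
    else k

-- inner 'for j in range(N-M+1)' with the two checks and early returns
def hmInner (M : Int) (arr : List (List Int)) (i : Int) (js : List Int) :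
    Option (Int × Int × Bool) :=
  match js with
  | [] => none
  | j :: rest =>
    let half := PySem.Int.floordiv M 2
    let kr := hmK (fun t => PySem.List.pyGetD (PySem.List.pyGetD arr i []) (j + t) 0) M 0 half.toNat
    if kr == half then some (i, j, true)
    else
      let kc := hmK (fun t => PySem.List.pyGetD (PySem.List.pyGetD arr (j + t) []) i 0) M 0 half.toNat
      if kc == half then some (i, j, false)
      else hmInner M arr i rest

-- outer 'for i in range(N)'
def hmOuter (N : Int) (M : Int) (arr : List (List Int)) (is : List Int) :
    Option (Int × Int × Bool) :=
  match is with
  | [] => none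
  | i :: rest =>
    match hmInner M arr i (PySem.List.pyRange 0 (N - M + 1) 1) with
    | some r => some r
    | none => hmOuter N M arr rest

def hm (N : Int) (M : Int) (arr : List (List Int)) : Option (Int × Int × Bool) :=
  hmOuter N M arr (PySem.List.pyRange 0 N 1)

-- ===== PORT B =====
-- pal_starts(seq): [seq[j:j+half] == seq[j+M-half:j+M][::-1] for j in range(N-M+1)]
def palStarts (N M half : Int) (seq : List Int) : List Bool :=
  (PySem.List.pyRange 0 (N - M + 1) 1).map (fun j =>
    PySem.List.slice seq (some j) (some (j + half)) ==
      (PySem.List.slice seq (some (j + M - half)) (some (j + M))).reverse)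

-- the final table scan, inner loop over j
def altScanJ (rowi coli : List Bool) (i : Int) (js : List Int) : Option (Int × Int × Bool) :=
  match js with
  | [] => none
  | j :: rest =>
    if PySem.List.pyGetD rowi j false then some (i, j, true)
    else if PySem.List.pyGetD coli j false then some (i, j, false)
    else altScanJ rowi coli i rest

-- the final table scan, outer loop over i
def altScanI (rowpal colpal : List (List Bool)) (js : List Int) (is : List Int) :
    Option (Int × Int × Bool) :=
  match is with
  | [] => none
  | i :: rest =>
    match altScanJ (PySem.List.pyGetD rowpal i []) (PySem.List.pyGetD colpal i []) i js with
    | some r => some r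
    | none => altScanI rowpal colpal js rest

def hm_alt (N : Int) (M : Int) (arr : List (List Int)) : Option (Int × Int × Bool) :=
  if M < 0 ∨ M > N ∨ N ≤ 0 then none
  else
    let half := PySem.Int.floordiv M 2
    let rowpal := (PySem.List.pyRange 0 N 1).map (fun i =>
      palStarts N M half (PySem.List.pyGetD arr i []))
    let colpal := (PySem.List.pyRange 0 N 1).map (fun i =>
      palStarts N M half ((PySem.List.pyRange 0 N 1).map
        (fun r => PySem.List.pyGetD (PySem.List.pyGetD arr r []) i 0)))
    altScanI rowpal colpal (PySem.List.pyRange 0 (N - M + 1) 1) (PySem.List.pyRange 0 N 1)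

-- ===== PRECONDITION & SPEC =====
-- Pre_ excludes undersized arrays (smaller than N×N while some window of length M fits):
-- there A may hit an IndexError, or return from a window it completed before reaching a
-- missing entry; B's precomputation reads the whole N×N grid and raises there.
def Pre_hm (N : Int) (M : Int) (arr : List (List Int)) : Prop :=
  (1 ≤ N ∧ 0 ≤ M ∧ M ≤ N) →
    (N ≤ (arr.length : Int) ∧ ∀ row ∈ arr, N ≤ (row.length : Int))
instance (N : Int) (M : Int) (arr : List (List Int)) : Decidable (Pre_hm N M arr) := by
  unfold Pre_hm; infer_instance

def pvWitness_hm : Int × Int × List (List Int) := (2, 2, [[1, 2], [3, 1]])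

def Spec_hm (N : Int) (M : Int) (arr : List (List Int)) (out : Option (Int × Int × Bool)) : Prop := out = hm_alt N M arr
instance (N : Int) (M : Int) (arr : List (List Int)) (out : Option (Int × Int × Bool)) : Decidable (Spec_hm N M arr out) := by unfold Spec_hm; infer_instance

-- ===== CLAIM (what is proved, stated in full; the proofs are below) =====
def Claim_equal_hm : Prop := ∀ (N : Int) (M : Int) (arr : List (List Int)), Dom_hm N M arr → Pre_hm N M arr → Spec_hm N M arr (hm N M arr)

-- ===== LEMMAS AND PROOFS =====

theorem pv_half_eq (M : Int) : PySem.Int.floordiv M 2 = M / 2 := by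
  simp [PySem.Int.floordiv, Int.fdiv_eq_ediv]

-- the while-loop reaches M//2 iff every pair of the half-window matches
theorem hmK_eq_half_iff (get : Int → Int) (M : Int) :
    ∀ (fuel : Nat) (k : Int), k ≤ M / 2 → fuel = (M / 2 - k).toNat →
      ((hmK get M k fuel = M / 2) ↔ ∀ t, k ≤ t → t < M / 2 → get t = get (M - t - 1))
  | 0, k, hk, hf => by
    have hke : M / 2 = k := by omega
    simp only [hmK, hke]
    constructor
    · intro _ t ht1 ht2; omega
    · intro _; trivial
  | (f + 1), k, hk, hf => by
    have hklt : k < M / 2 := by omega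
    rw [hmK]
    rw [if_pos (by rw [pv_half_eq]; exact hklt)]
    by_cases hg : get k = get (M - k - 1)
    · rw [if_pos (by simpa [beq_iff_eq] using hg)]
      rw [hmK_eq_half_iff get M f (k + 1) (by omega) (by omega)]
      constructor
      · intro h t ht1 ht2
        rcases eq_or_lt_of_le ht1 with he | hlt
        · exact he ▸ hg
        · exact h t (by omega) ht2
      · intro h t ht1 ht2; exact h t (by omega) ht2
    · rw [if_neg (by simpa [beq_iff_eq] using hg)]
      have hne : ¬ (k = M / 2) := by omega
      simp only [hne, false_iff]
      intro h; exact hg (h k le_rfl hklt)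

-- half-slice = reversed half-slice iff all index pairs match
theorem slice_rev_iff (l : List Int) (a b h : Nat)
    (ha : a + h ≤ l.length) (hb : b + h ≤ l.length) :
    ((l.drop a).take h = ((l.drop b).take h).reverse) ↔
      ∀ t < h, l.getD (a + t) 0 = l.getD (b + h - 1 - t) 0 := by
  have hla : ((l.drop a).take h).length = h := by simp; omega
  have hlb : (((l.drop b).take h).reverse).length = h := by simp; omega
  constructor
  · intro he t ht
    have h1 : t < ((l.drop a).take h).length := by omega
    have h2 : t < (((l.drop b).take h).reverse).length := by omega
    have := List.getElem_of_eq he h1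
    rw [List.getElem_take, List.getElem_drop] at this
    rw [List.getElem_reverse, List.getElem_take, List.getElem_drop] at this
    rw [List.getD_eq_getElem l 0 (by omega : a + t < l.length),
        List.getD_eq_getElem l 0 (by omega : b + h - 1 - t < l.length)]
    rw [this]
    congr 1
    simp at hlb ⊢
    omega
  · intro hp
    apply List.ext_getElem (by omega)
    intro i h1 h2
    have hi : i < h := by omega
    rw [List.getElem_take, List.getElem_drop]
    rw [List.getElem_reverse, List.getElem_take, List.getElem_drop]
    have := hp i hi
    rw [List.getD_eq_getElem l 0 (by omega : a + i < l.length),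
        List.getD_eq_getElem l 0 (by omega : b + h - 1 - i < l.length)] at this
    rw [this]
    congr 1
    simp at hlb ⊢
    omega

-- A's per-window check agrees with B's slice/reverse test, over any sequence l
theorem check_eq (l : List Int) (M j : Int) (get : Int → Int)
    (hM : 0 ≤ M) (hj : 0 ≤ j) (hlen : j + M ≤ (l.length : Int))
    (hget : ∀ t, 0 ≤ t → t < M → get t = l.getD (j + t).toNat 0) :
    (hmK get M 0 (PySem.Int.floordiv M 2).toNat == PySem.Int.floordiv M 2) =
    (PySem.List.slice l (some j) (some (j + PySem.Int.floordiv M 2)) ==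
      (PySem.List.slice l (some (j + M - PySem.Int.floordiv M 2)) (some (j + M))).reverse) := by
  rw [pv_half_eq]
  have hh0 : 0 ≤ M / 2 := by omega
  have hh1 : 2 * (M / 2) ≤ M := by omega
  rw [PySem.List.slice_toNat l (by omega) (by omega)]
  rw [PySem.List.slice_toNat l (by omega) (by omega)]
  have e1 : (j + M / 2).toNat - j.toNat = (M / 2).toNat := by omega
  have e2 : (j + M).toNat - (j + M - M / 2).toNat = (M / 2).toNat := by omega
  rw [e1, e2]
  rw [Bool.eq_iff_iff]
  simp only [beq_iff_eq]
  rw [hmK_eq_half_iff get M (M / 2).toNat 0 hh0 (by omega)]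
  rw [slice_rev_iff l j.toNat (j + M - M / 2).toNat (M / 2).toNat (by omega) (by omega)]
  constructor
  · intro hp t ht
    have h1 := hp (t : Int) (by omega) (by omega)
    rw [hget _ (by omega) (by omega), hget _ (by omega) (by omega)] at h1
    have e3 : (j + (t : Int)).toNat = j.toNat + t := by omega
    have e4 : (j + (M - (t : Int) - 1)).toNat = (j + M - M / 2).toNat + (M / 2).toNat - 1 - t := by omega
    rw [e3, e4] at h1
    exact h1
  · intro hp t ht1 ht2
    have h1 := hp t.toNat (by omega)
    rw [hget _ (by omega) (by omega), hget _ (by omega) (by omega)]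
    have e3 : (j + t).toNat = j.toNat + t.toNat := by omega
    have e4 : (j + (M - t - 1)).toNat = (j + M - M / 2).toNat + (M / 2).toNat - 1 - t.toNat := by omega
    rw [e3, e4]
    exact h1

-- for negative M both window checks of A fail, so the inner loop returns none
theorem hmInner_none_neg (M : Int) (hM : M < 0) (arr : List (List Int)) (i : Int) :
    ∀ js, hmInner M arr i js = none := by
  intro js
  induction js with
  | nil => rfl
  | cons j rest ih =>
    have hh : PySem.Int.floordiv M 2 < 0 := by rw [pv_half_eq]; omega
    have hf : (PySem.Int.floordiv M 2).toNat = 0 := by omega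
    rw [hmInner]
    simp only [hf, hmK]
    rw [if_neg (by simp [beq_iff_eq]; omega), if_neg (by simp [beq_iff_eq]; omega)]
    exact ih

theorem hmOuter_none (N M : Int) (arr : List (List Int)) :
    ∀ is, (∀ i ∈ is, hmInner M arr i (PySem.List.pyRange 0 (N - M + 1) 1) = none) →
      hmOuter N M arr is = none := by
  intro is
  induction is with
  | nil => intro _; rfl
  | cons i rest ih =>
    intro h
    rw [hmOuter, h i (by simp)]
    exact ih (fun i' hi' => h i' (by simp [hi']))

-- pointwise: A's inner j-loop equals B's table scan for row i
theorem inner_eq (N M : Int) (arr : List (List Int)) (hM : 0 ≤ M) (hMN : M ≤ N)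
    (harr : N ≤ (arr.length : Int)) (hrow : ∀ row ∈ arr, N ≤ (row.length : Int))
    (i : Int) (hi0 : 0 ≤ i) (hiN : i < N) :
    ∀ js, (∀ j ∈ js, 0 ≤ j ∧ j < N - M + 1) →
      hmInner M arr i js =
        altScanJ (palStarts N M (PySem.Int.floordiv M 2) (PySem.List.pyGetD arr i []))
          (palStarts N M (PySem.Int.floordiv M 2)
            ((PySem.List.pyRange 0 N 1).map
              (fun r => PySem.List.pyGetD (PySem.List.pyGetD arr r []) i 0)))
          i js := by
  intro js
  induction js with
  | nil => intro _; rfl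
  | cons j rest ih =>
    intro h
    obtain ⟨hj0, hjN⟩ := h j (by simp)
    have hrowmem : PySem.List.pyGetD arr i [] ∈ arr := by
      apply PySem.List.pyGetD_mem
      simp [PySem.Raise.InRange]
      omega
    have hrowlen : N ≤ ((PySem.List.pyGetD arr i []).length : Int) :=
      hrow _ hrowmem
    have hcollen : ((((PySem.List.pyRange 0 N 1).map
        (fun r => PySem.List.pyGetD (PySem.List.pyGetD arr r []) i 0)).length : Int)) = N := by
      simp [PySem.List.length_pyRange_one]
      omega
    -- A's row check equals B's row-slice test
    have hA : (hmK (fun t => PySem.List.pyGetD (PySem.List.pyGetD arr i []) (j + t) 0) M 0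
        (PySem.Int.floordiv M 2).toNat == PySem.Int.floordiv M 2) =
        (PySem.List.slice (PySem.List.pyGetD arr i []) (some j)
            (some (j + PySem.Int.floordiv M 2)) ==
          (PySem.List.slice (PySem.List.pyGetD arr i [])
            (some (j + M - PySem.Int.floordiv M 2)) (some (j + M))).reverse) := by
      apply check_eq _ M j _ hM hj0 (by omega)
      intro t ht0 htM
      rw [PySem.List.pyGetD_eq_getElem (PySem.List.pyGetD arr i []) 0 (by omega) (by omega)]
      rw [List.getD_eq_getElem _ 0 (by omega)]
    -- A's column check equals B's column-slice test
    have hcolget : ∀ (k : Nat) (hk : k < ((PySem.List.pyRange 0 N 1).map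
        (fun r => PySem.List.pyGetD (PySem.List.pyGetD arr r []) i 0)).length),
        ((PySem.List.pyRange 0 N 1).map
          (fun r => PySem.List.pyGetD (PySem.List.pyGetD arr r []) i 0))[k] =
          PySem.List.pyGetD (PySem.List.pyGetD arr (k : Int) []) i 0 := by
      intro k hk
      rw [List.getElem_map]
      rw [PySem.List.getElem_pyRange_one]
      norm_num
    have hB : (hmK (fun t => PySem.List.pyGetD (PySem.List.pyGetD arr (j + t) []) i 0) M 0
        (PySem.Int.floordiv M 2).toNat == PySem.Int.floordiv M 2) =
        (PySem.List.slice ((PySem.List.pyRange 0 N 1).map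
            (fun r => PySem.List.pyGetD (PySem.List.pyGetD arr r []) i 0)) (some j)
            (some (j + PySem.Int.floordiv M 2)) ==
          (PySem.List.slice ((PySem.List.pyRange 0 N 1).map
            (fun r => PySem.List.pyGetD (PySem.List.pyGetD arr r []) i 0))
            (some (j + M - PySem.Int.floordiv M 2)) (some (j + M))).reverse) := by
      apply check_eq _ M j _ hM hj0 (by omega)
      intro t ht0 htM
      rw [List.getD_eq_getElem _ 0 (by omega)]
      rw [hcolget (j + t).toNat (by omega)]
      have hcast : (((j + t).toNat : Int)) = j + t := by omega
      rw [hcast]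
    -- table lookups reduce to the slice tests
    have hlkR : PySem.List.pyGetD
        (palStarts N M (PySem.Int.floordiv M 2) (PySem.List.pyGetD arr i [])) j false =
        (PySem.List.slice (PySem.List.pyGetD arr i []) (some j)
            (some (j + PySem.Int.floordiv M 2)) ==
          (PySem.List.slice (PySem.List.pyGetD arr i [])
            (some (j + M - PySem.Int.floordiv M 2)) (some (j + M))).reverse) := by
      rw [palStarts]
      rw [PySem.List.pyGetD_map_pyRange_of_nonneg _ _ _ _ hj0 hjN]
    have hlkC : PySem.List.pyGetD
        (palStarts N M (PySem.Int.floordiv M 2) ((PySem.List.pyRange 0 N 1).map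
          (fun r => PySem.List.pyGetD (PySem.List.pyGetD arr r []) i 0))) j false =
        (PySem.List.slice ((PySem.List.pyRange 0 N 1).map
            (fun r => PySem.List.pyGetD (PySem.List.pyGetD arr r []) i 0)) (some j)
            (some (j + PySem.Int.floordiv M 2)) ==
          (PySem.List.slice ((PySem.List.pyRange 0 N 1).map
            (fun r => PySem.List.pyGetD (PySem.List.pyGetD arr r []) i 0))
            (some (j + M - PySem.Int.floordiv M 2)) (some (j + M))).reverse) := by
      rw [palStarts]
      rw [PySem.List.pyGetD_map_pyRange_of_nonneg _ _ _ _ hj0 hjN]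
    rw [hmInner, altScanJ]
    simp only [hlkR, hlkC, ← hA, ← hB]
    split
    · rfl
    · split
      · rfl
      · exact ih (fun j' hj' => h j' (by simp [hj']))

-- the outer i-loops agree
theorem outer_eq (N M : Int) (arr : List (List Int)) (hM : 0 ≤ M) (hMN : M ≤ N)
    (harr : N ≤ (arr.length : Int)) (hrow : ∀ row ∈ arr, N ≤ (row.length : Int)) :
    ∀ is, (∀ i ∈ is, 0 ≤ i ∧ i < N) →
      hmOuter N M arr is =
        altScanI
          ((PySem.List.pyRange 0 N 1).map (fun i =>
            palStarts N M (PySem.Int.floordiv M 2) (PySem.List.pyGetD arr i [])))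
          ((PySem.List.pyRange 0 N 1).map (fun i =>
            palStarts N M (PySem.Int.floordiv M 2)
              ((PySem.List.pyRange 0 N 1).map
                (fun r => PySem.List.pyGetD (PySem.List.pyGetD arr r []) i 0))))
          (PySem.List.pyRange 0 (N - M + 1) 1) is := by
  intro is
  induction is with
  | nil => intro _; rfl
  | cons i rest ih =>
    intro h
    obtain ⟨hi0, hiN⟩ := h i (by simp)
    rw [hmOuter, altScanI]
    rw [PySem.List.pyGetD_map_pyRange_of_nonneg _ _ _ _ hi0 hiN]
    rw [PySem.List.pyGetD_map_pyRange_of_nonneg _ _ _ _ hi0 hiN]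
    rw [← inner_eq N M arr hM hMN harr hrow i hi0 hiN (PySem.List.pyRange 0 (N - M + 1) 1)
      (fun j hj => by rw [PySem.List.mem_pyRange_one] at hj; omega)]
    split
    · rfl
    · exact ih (fun i' hi' => h i' (by simp [hi']))

theorem hm_spec : Claim_equal_hm := by
  intro N M arr _ hpre
  unfold Spec_hm
  by_cases hN : N ≤ 0
  · rw [hm, PySem.List.pyRange_one_eq_nil (by omega)]
    rw [hm_alt, if_pos (by omega)]
    rfl
  · by_cases hMneg : M < 0
    · rw [hm, hm_alt, if_pos (by omega)]
      exact hmOuter_none N M arr _ (fun i _ => hmInner_none_neg M hMneg arr i _)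
    · by_cases hMN : M > N
      · rw [hm, hm_alt, if_pos (by omega)]
        apply hmOuter_none
        intro i _
        rw [PySem.List.pyRange_one_eq_nil (by omega)]
        rfl
      · -- main case: 1 ≤ N, 0 ≤ M ≤ N, array is at least N × N
        obtain ⟨harr, hrow⟩ := hpre ⟨by omega, by omega, by omega⟩
        rw [hm, hm_alt, if_neg (by omega)]
        exact outer_eq N M arr (by omega) (by omega) harr hrow (PySem.List.pyRange 0 N 1)
          (fun i hi => by rw [PySem.List.mem_pyRange_one] at hi; omega)
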